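-- pv_equiv track=rewrite | github.com/Dream-IIITN/dps_project | homophonic_cipher_breaker/utils/substitution/solverCribbing.py | lock_crib_in_key
-- ===== SOURCE A (Python) =====
-- def lock_crib_in_key(crib_word, cipher_word, key):
--     """
--     Attempt to map a crib word to a ciphertext word. If successful, lock the mappings in the key.
--     """
--     temp_key = key.copy()  # Make a temporary key to test mapping
--     for c_char, crib_char in zip(cipher_word, crib_word):
--         if temp_key[c_char] is None:
--             temp_key[c_char] = crib_char  # Assign mapping
--         elif temp_key[c_char] != crib_char:
--             return False, key  # Conflict detected
--     return True, temp_key  # No conflict, return the updated key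
-- ===== SOURCE B (Python) =====
-- def lock_crib_in_key(crib_word, cipher_word, key):
--     """
--     Attempt to map a crib word to a ciphertext word. If successful, lock the mappings in the key.
--     """
--     # Pass 1: build the cipher-letter -> crib-letter table for this word,
--     # failing on an inconsistent pairing inside the word itself.
--     mapping = {}
--     for c_char, crib_char in zip(cipher_word, crib_word):
--         prev = mapping.get(c_char)
--         if prev is None:
--             mapping[c_char] = crib_char
--         elif prev != crib_char:
--             return False, key
--     # Pass 2: validate the table against the key and build the updated key.
--     new_key = dict(key)
--     for c_char, crib_char in mapping.items():
--         locked = key[c_char]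
--         if locked is None:
--             new_key[c_char] = crib_char
--         elif locked != crib_char:
--             return False, key
--     return True, new_key
-- ===== Notes on version B (the rewrite author's own statement) =====
-- stated objective: alternative
-- what changed: Instead of A's single pass that mutates a copy of the key while scanning cipher/crib pairs, B first builds a per-word cipher->crib table (detecting in-word inconsistencies without touching the key), then validates that table against the original key in a second pass and only then constructs the updated key.
-- outside the precondition, e.g. on lock_crib_in_key('ab', 'xy', {'x': 'z'}): A returns (False, {'x': 'z'}), B returns (False, {'x': 'z'}); on lock_crib_in_key('a', 'x', {}): A raises KeyError, B raises KeyError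
import Mathlib
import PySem

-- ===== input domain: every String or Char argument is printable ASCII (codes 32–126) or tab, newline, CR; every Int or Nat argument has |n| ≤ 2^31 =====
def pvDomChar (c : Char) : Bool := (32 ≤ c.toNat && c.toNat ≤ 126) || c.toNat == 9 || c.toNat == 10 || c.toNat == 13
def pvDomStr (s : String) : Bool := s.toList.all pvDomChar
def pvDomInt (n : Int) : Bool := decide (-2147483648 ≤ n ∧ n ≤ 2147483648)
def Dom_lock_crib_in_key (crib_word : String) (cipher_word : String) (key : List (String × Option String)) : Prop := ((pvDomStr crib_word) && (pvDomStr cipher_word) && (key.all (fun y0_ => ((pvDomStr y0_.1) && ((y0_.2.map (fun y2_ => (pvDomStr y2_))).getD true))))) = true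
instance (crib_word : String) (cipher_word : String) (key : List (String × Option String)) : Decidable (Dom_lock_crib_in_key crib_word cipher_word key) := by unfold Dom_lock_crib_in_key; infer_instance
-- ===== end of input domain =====

-- B replaces A's mutate-a-key-copy single pass by two passes: build a per-word cipher->crib
-- table, then validate it against the original key (alternative decomposition, same cost).


-- ===== PORT A =====
-- A's for-loop over zip(cipher_word, crib_word); state: temp_key. `(false, key)` in the
-- `none` lookup branch marks Python's KeyError (unreachable under Pre_).
def lockA_loop (key : PySem.Dict String (Option String)) :
    List (Char × Char) → PySem.Dict String (Option String) → Bool × PySem.Dict String (Option String)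
  | [], temp => (true, temp)
  | (c, cr) :: rest, temp =>
    match temp.get? (String.singleton c) with
    | none => (false, key)  -- Python: KeyError (outside Pre_)
    | some none => lockA_loop key rest (temp.insert (String.singleton c) (some (String.singleton cr)))
    | some (some v) =>
      if v = String.singleton cr then lockA_loop key rest temp else (false, key)

def lock_crib_in_key (crib_word : String) (cipher_word : String) (key : List (String × Option String)) : Bool × (List (String × Option String)) :=
  let d := PySem.Dict.mk key
  let r := lockA_loop d (cipher_word.toList.zip crib_word.toList) d
  (r.1, r.2.items)

-- ===== PORT B =====
-- pass 1 of Source B: build the per-word cipher->crib table; none = in-word inconsistency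
def lockB_build : List (Char × Char) → PySem.Dict String String → Option (PySem.Dict String String)
  | [], m => some m
  | (c, cr) :: rest, m =>
    match m.get? (String.singleton c) with
    | none => lockB_build rest (m.insert (String.singleton c) (String.singleton cr))
    | some prev => if prev = String.singleton cr then lockB_build rest m else none

-- pass 2 of Source B: validate the table against key, building new_key; none covers both the
-- conflict return and Python's KeyError (the latter unreachable under Pre_)
def lockB_check (key : PySem.Dict String (Option String)) :
    List (String × String) → PySem.Dict String (Option String) → Option (PySem.Dict String (Option String))
  | [], nk => some nk
  | (c, cr) :: rest, nk =>
    match key.get? c with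
    | none => none  -- Python: KeyError (outside Pre_)
    | some none => lockB_check key rest (nk.insert c (some cr))
    | some (some v) => if v = cr then lockB_check key rest nk else none

def lock_crib_in_key_alt (crib_word : String) (cipher_word : String) (key : List (String × Option String)) : Bool × (List (String × Option String)) :=
  let d := PySem.Dict.mk key
  match lockB_build (cipher_word.toList.zip crib_word.toList) (PySem.Dict.mk []) with
  | none => (false, key)
  | some m =>
    match lockB_check d m.items d with
    | none => (false, key)
    | some nk => (true, nk.items)

-- ===== PRECONDITION & SPEC =====
-- Pre_ excludes (a) association lists with duplicate keys, which represent no Python dict, and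
-- (b) inputs where some zipped cipher character is absent from key: there A either raises
-- KeyError, or returns (False, key) only because an earlier conflict masks the later KeyError
-- (B returns the same (False, key) on the masked cases it reaches).
def Pre_lock_crib_in_key (crib_word : String) (cipher_word : String) (key : List (String × Option String)) : Prop :=
  (key.map Prod.fst).Nodup ∧
  ∀ p ∈ cipher_word.toList.zip crib_word.toList, (PySem.Dict.mk key).contains (String.singleton p.1) = true
instance (crib_word : String) (cipher_word : String) (key : List (String × Option String)) : Decidable (Pre_lock_crib_in_key crib_word cipher_word key) := by unfold Pre_lock_crib_in_key; infer_instance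

def pvWitness_lock_crib_in_key : String × String × (List (String × Option String)) :=
  ("ab", "xy", [("x", none), ("y", some "b")])

def Spec_lock_crib_in_key (crib_word : String) (cipher_word : String) (key : List (String × Option String)) (out : Bool × (List (String × Option String))) : Prop := out = lock_crib_in_key_alt crib_word cipher_word key
instance (crib_word : String) (cipher_word : String) (key : List (String × Option String)) (out : Bool × (List (String × Option String))) : Decidable (Spec_lock_crib_in_key crib_word cipher_word key out) := by unfold Spec_lock_crib_in_key; infer_instance

-- ===== CLAIM (what is proved, stated in full; the proofs are below) =====
def Claim_equal_lock_crib_in_key : Prop := ∀ (crib_word : String) (cipher_word : String) (key : List (String × Option String)), Dom_lock_crib_in_key crib_word cipher_word key → Pre_lock_crib_in_key crib_word cipher_word key → Spec_lock_crib_in_key crib_word cipher_word key (lock_crib_in_key crib_word cipher_word key)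

-- ===== LEMMAS AND PROOFS =====

-- apply a list of locked assignments to a key-dict (the inserts both versions perform)
def applyL (l : List (String × String)) (k : PySem.Dict String (Option String)) : PySem.Dict String (Option String) :=
  l.foldl (fun k p => k.insert p.1 (some p.2)) k

theorem insert_eq_self {d : PySem.Dict String (Option String)} {k : String} {v : Option String}
    (hnd : d.keys.Nodup) (h : d.get? k = some v) : d.insert k v = d := by
  apply PySem.Dict.ext
  rw [PySem.Dict.items_insert_of_contains]
  · apply List.map_congr_left ?_  |>.trans (List.map_id _)
    intro p hp
    by_cases hk : p.1 == k
    · simp only [hk, if_true]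
      have h2 : d.get? p.1 = some p.2 := PySem.Dict.get?_of_mem_items _ (by simpa using hp) hnd
      have : p.1 = k := by simpa using hk
      subst this
      rw [h2] at h; cases h; rfl
    · simp [hk]
  · rw [PySem.Dict.contains_eq_isSome_get?, h]; rfl

theorem check_none_of_bad (key : PySem.Dict String (Option String)) (l : List (String × String))
    (nk : PySem.Dict String (Option String))
    (h : ∃ p ∈ l, ∃ v, key.get? p.1 = some (some v) ∧ v ≠ p.2) :
    lockB_check key l nk = none := by
  induction l generalizing nk with
  | nil => simp at h
  | cons p t ih =>
    obtain ⟨q, hq, v, hv, hne⟩ := h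
    simp only [lockB_check]
    rcases List.mem_cons.mp hq with hq | hq
    · subst hq
      rw [hv]
      simp only [if_neg hne]
    · cases hk : key.get? p.1 with
      | none => rfl
      | some w =>
        cases w with
        | none => exact ih _ ⟨q, hq, v, hv, hne⟩
        | some u =>
          by_cases hu : u = p.2
          · simp only [if_pos hu]; exact ih _ ⟨q, hq, v, hv, hne⟩
          · simp only [if_neg hu]

theorem build_extends (pairs : List (Char × Char)) (m m' : PySem.Dict String String)
    (h : lockB_build pairs m = some m') : ∃ ext, m'.items = m.items ++ ext := by
  induction pairs generalizing m with
  | nil => cases h; exact ⟨[], (List.append_nil _).symm⟩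
  | cons p t ih =>
    obtain ⟨c, cr⟩ := p
    simp only [lockB_build] at h
    cases hg : m.get? (String.singleton c) with
    | none =>
      simp only [hg] at h
      obtain ⟨ext, hext⟩ := ih _ h
      refine ⟨(String.singleton c, String.singleton cr) :: ext, ?_⟩
      rw [hext, PySem.Dict.items_insert_of_not_contains, List.append_assoc]
      · rfl
      · exact (PySem.Dict.get?_eq_none_iff_contains _ _).mp hg
    | some prev =>
      simp only [hg] at h
      by_cases hp : prev = String.singleton cr
      · rw [if_pos hp] at h; exact ih _ h
      · rw [if_neg hp] at h; cases h

theorem check_eq_applyL (key : PySem.Dict String (Option String)) (l : List (String × String))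
    (nk : PySem.Dict String (Option String))
    (hok : ∀ p ∈ l, key.get? p.1 = some none ∨ key.get? p.1 = some (some p.2))
    (hnd : nk.keys.Nodup)
    (hagree : ∀ x v, key.get? x = some (some v) → nk.get? x = some (some v)) :
    lockB_check key l nk = some (applyL l nk) := by
  induction l generalizing nk with
  | nil => rfl
  | cons p t ih =>
    obtain ⟨c, cr⟩ := p
    rcases hok _ (List.mem_cons_self) with hk | hk
    · simp only [lockB_check, applyL, List.foldl_cons, hk]
      exact ih _ (fun q hq => hok q (List.mem_cons_of_mem _ hq))
        (PySem.Dict.nodup_keys_insert _ _ _ hnd)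
        (fun x v hv => by
          have hxc : x ≠ c := fun he => by rw [he, hk] at hv; cases hv
          rw [PySem.Dict.get?_insert_of_ne _ _ hxc]; exact hagree x v hv)
    · simp only [lockB_check, applyL, List.foldl_cons, hk]
      rw [insert_eq_self hnd (hagree c cr hk)]
      exact ih _ (fun q hq => hok q (List.mem_cons_of_mem _ hq)) hnd hagree

theorem nodup_applyL (l : List (String × String)) (k : PySem.Dict String (Option String))
    (h : k.keys.Nodup) : (applyL l k).keys.Nodup := by
  induction l generalizing k with
  | nil => exact h
  | cons p t ih => exact ih _ (PySem.Dict.nodup_keys_insert _ _ _ h)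

theorem get?_applyL (l : List (String × String)) (k : PySem.Dict String (Option String)) (x : String)
    (hnd : (l.map Prod.fst).Nodup) :
    (applyL l k).get? x =
      match (PySem.Dict.mk l).get? x with
      | some v => some (some v)
      | none => k.get? x := by
  induction l generalizing k with
  | nil =>
    have h0 : (PySem.Dict.mk ([] : List (String × String))).get? x = none := by
      rw [PySem.Dict.get?_eq_none_iff_not_mem_keys]; simp [PySem.Dict.keys]
    simp [applyL, h0]
  | cons p t ih =>
    simp only [List.map_cons, List.nodup_cons] at hnd
    have := ih (k.insert p.1 (some p.2)) hnd.2
    simp only [applyL, List.foldl_cons] at this ⊢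
    rw [this, PySem.Dict.get?_mk_cons]
    by_cases hx : x = p.1
    · subst hx
      have ht : (PySem.Dict.mk t).get? p.1 = none := by
        rw [PySem.Dict.get?_eq_none_iff_not_mem_keys]
        simpa [PySem.Dict.keys] using hnd.1
      rw [ht]
      simp [PySem.Dict.get?_insert_self]
    · have : (p.1 == x) = false := by simp [Ne.symm hx]
      rw [this]
      simp only [Bool.false_eq_true, if_false]
      cases h : (PySem.Dict.mk t).get? x <;> simp [PySem.Dict.get?_insert_of_ne _ _ hx]

def bRes (key : PySem.Dict String (Option String)) (pairs : List (Char × Char))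
    (m : PySem.Dict String String) : Bool × PySem.Dict String (Option String) :=
  match lockB_build pairs m with
  | none => (false, key)
  | some m' =>
    match lockB_check key m'.items key with
    | none => (false, key)
    | some nk => (true, nk)

theorem main_lemma (pairs : List (Char × Char)) (key : PySem.Dict String (Option String))
    (m : PySem.Dict String String)
    (hknd : key.keys.Nodup) (hmnd : m.keys.Nodup)
    (hok : ∀ p ∈ m.items, key.get? p.1 = some none ∨ key.get? p.1 = some (some p.2))
    (hpre : ∀ p ∈ pairs, key.contains (String.singleton p.1) = true) :
    lockA_loop key pairs (applyL m.items key) = bRes key pairs m := by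
  induction pairs generalizing m with
  | nil =>
    simp only [lockA_loop, bRes, lockB_build]
    rw [check_eq_applyL key m.items key hok hknd (fun _ _ h => h)]
  | cons p rest ih =>
    obtain ⟨c, cr⟩ := p
    have hmnd' : (m.items.map Prod.fst).Nodup := by simpa [PySem.Dict.keys] using hmnd
    have hmk : PySem.Dict.mk m.items = m := PySem.Dict.ext rfl
    have hc : key.contains (String.singleton c) = true := hpre _ List.mem_cons_self
    have hpre' : ∀ q ∈ rest, key.contains (String.singleton q.1) = true :=
      fun q hq => hpre q (List.mem_cons_of_mem _ hq)
    have hgc := get?_applyL m.items key (String.singleton c) hmnd'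
    rw [hmk] at hgc
    cases hm : m.get? (String.singleton c) with
    | some v =>
      simp only [hm] at hgc
      by_cases hv : v = String.singleton cr
      · subst hv
        simp only [lockA_loop, bRes, lockB_build, hm, hgc]
        simpa only [bRes] using ih m hmnd hok hpre'
      · simp only [lockA_loop, bRes, lockB_build, hm, hgc, if_neg hv]
    | none =>
      simp only [hm] at hgc
      have hkc : (key.get? (String.singleton c)).isSome := by
        rw [← PySem.Dict.contains_eq_isSome_get?]; exact hc
      have hnc : m.contains (String.singleton c) = false :=
        (PySem.Dict.get?_eq_none_iff_contains _ _).mp hm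
      have hitems : (m.insert (String.singleton c) (String.singleton cr)).items
          = m.items ++ [(String.singleton c, String.singleton cr)] :=
        PySem.Dict.items_insert_of_not_contains _ _ hnc
      have hmnd2 : (m.insert (String.singleton c) (String.singleton cr)).keys.Nodup :=
        PySem.Dict.nodup_keys_insert _ _ _ hmnd
      cases hk : key.get? (String.singleton c) with
      | none => rw [hk] at hkc; simp at hkc
      | some w =>
        rw [hk] at hgc
        cases w with
        | none =>
          -- A assigns into temp_key; B records a fresh table entry: the two states stay aligned
          have hok' : ∀ p ∈ (m.insert (String.singleton c) (String.singleton cr)).items,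
              key.get? p.1 = some none ∨ key.get? p.1 = some (some p.2) := by
            intro p hp
            rw [hitems] at hp
            rcases List.mem_append.mp hp with hp | hp
            · exact hok p hp
            · simp only [List.mem_singleton] at hp; subst hp; exact Or.inl hk
          have happ : applyL (m.insert (String.singleton c) (String.singleton cr)).items key
              = (applyL m.items key).insert (String.singleton c) (some (String.singleton cr)) := by
            rw [hitems]; simp [applyL, List.foldl_append]
          have hrec := ih (m.insert (String.singleton c) (String.singleton cr)) hmnd2 hok' hpre'
          rw [happ] at hrec
          simp only [lockA_loop, bRes, lockB_build, hm, hgc]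
          simpa only [bRes] using hrec
        | some v =>
          by_cases hv : v = String.singleton cr
          · -- key already locks c to cr: A passes without assigning; B's fresh entry is a no-op
            subst hv
            have hok' : ∀ p ∈ (m.insert (String.singleton c) (String.singleton cr)).items,
                key.get? p.1 = some none ∨ key.get? p.1 = some (some p.2) := by
              intro p hp
              rw [hitems] at hp
              rcases List.mem_append.mp hp with hp | hp
              · exact hok p hp
              · simp only [List.mem_singleton] at hp; subst hp; exact Or.inr hk
            have happ : applyL (m.insert (String.singleton c) (String.singleton cr)).items key
                = applyL m.items key := by
              rw [hitems]
              simp only [applyL, List.foldl_append, List.foldl_cons, List.foldl_nil]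
              exact insert_eq_self (nodup_applyL _ _ hknd) hgc
            have hrec := ih (m.insert (String.singleton c) (String.singleton cr)) hmnd2 hok' hpre'
            rw [happ] at hrec
            simp only [lockA_loop, bRes, lockB_build, hm, hgc]
            simpa only [bRes] using hrec
          · -- conflict with the key: A fails now; B fails in pass 2 (or already in pass 1)
            simp only [lockA_loop, bRes, lockB_build, hm, hgc, if_neg hv]
            cases hb : lockB_build rest (m.insert (String.singleton c) (String.singleton cr)) with
            | none => rfl
            | some m'' =>
              obtain ⟨ext, hext⟩ := build_extends _ _ _ hb
              have hmem : (String.singleton c, String.singleton cr) ∈ m''.items := by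
                rw [hext, hitems]
                exact List.mem_append_left _ (List.mem_append_right _ (List.mem_singleton_self _))
              have hchk := check_none_of_bad key m''.items key
                ⟨(String.singleton c, String.singleton cr), hmem, v, hk, hv⟩
              simp [hchk]

-- ===== VERDICT (by name: the statement is the Claim_ definition above) =====
theorem lock_crib_in_key_spec : Claim_equal_lock_crib_in_key := by
  intro crib_word cipher_word key _hdom hpre
  obtain ⟨hnd, hcont⟩ := hpre
  simp only [Spec_lock_crib_in_key, lock_crib_in_key, lock_crib_in_key_alt]
  have hknd : (PySem.Dict.mk key).keys.Nodup := by simpa [PySem.Dict.keys] using hnd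
  have h := main_lemma (cipher_word.toList.zip crib_word.toList) (PySem.Dict.mk key)
    (PySem.Dict.mk []) hknd (by simp [PySem.Dict.keys])
    (by intro p hp; simp at hp) hcont
  have h' : lockA_loop (PySem.Dict.mk key) (cipher_word.toList.zip crib_word.toList)
      (PySem.Dict.mk key) = bRes (PySem.Dict.mk key) (cipher_word.toList.zip crib_word.toList)
      (PySem.Dict.mk []) := h
  rw [h', bRes]
  cases hb : lockB_build (cipher_word.toList.zip crib_word.toList) (PySem.Dict.mk []) with
  | none => rfl
  | some m =>
    cases hc : lockB_check (PySem.Dict.mk key) m.items (PySem.Dict.mk key) with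
    | none => simp only [hc]
    | some nk => simp only [hc]
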